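-- pv_equiv track=rewrite | github.com/Kettleblaq/geo | pynn/nearest_neighbor_index.py | calculate_estimate
-- ===== SOURCE A (Python) =====
-- def calculate_estimate(points, axis, query_point):
--     """
--     Returns the two closest points based on the x or y axis
--     """
--     low = 0
--     high = len(points) - 1
--
--     # Binary search to find the closest points
--     while low <= high:
--         mid = (low + high) // 2
--         if points[mid][axis] == query_point[axis]:
--             return mid, mid
--         elif points[mid][axis] < query_point[axis]:
--             low = mid + 1
--         else:
--             high = mid - 1
--
--     # Handle edge cases
--     if high < 0:
--         return low, low+1
--     elif low >= len(points):
--         return high-1, high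
--     elif abs(points[low][axis] - query_point[axis]) < abs(points[high][axis] - query_point[axis]):
--         return low, low+1
--     else:
--         return high-1, high
-- ===== SOURCE B (Python) =====
-- def calculate_estimate(points, axis, query_point):
--     """
--     Returns the two closest points based on the x or y axis
--     (recursive-descent reformulation: the search and the edge handling
--     are separated into two dedicated steps).
--     """
--
--     def search(low, high):
--         # Returns (hit_index_or_None, final_low, final_high).
--         if low > high:
--             return None, low, high
--         mid = (low + high) // 2
--         v = points[mid][axis]
--         if v == query_point[axis]:
--             return mid, low, high
--         if v < query_point[axis]:
--             return search(mid + 1, high)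
--         return search(low, mid - 1)
--
--     hit, low, high = search(0, len(points) - 1)
--     if hit is not None:
--         return hit, hit
--     if high < 0:
--         return low, low + 1
--     if low >= len(points):
--         return high - 1, high
--     if abs(points[low][axis] - query_point[axis]) < abs(points[high][axis] - query_point[axis]):
--         return low, low + 1
--     return high - 1, high
-- ===== Notes on version B (the rewrite author's own statement) =====
-- stated objective: alternative
-- what changed: The iterative while-loop binary search is re-decomposed into a recursive helper search(low, high) that returns either the landed exact-match index or the final (low, high) pair, with the four-way edge handling moved out of the loop body into a separate top-level step.
import Mathlib
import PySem

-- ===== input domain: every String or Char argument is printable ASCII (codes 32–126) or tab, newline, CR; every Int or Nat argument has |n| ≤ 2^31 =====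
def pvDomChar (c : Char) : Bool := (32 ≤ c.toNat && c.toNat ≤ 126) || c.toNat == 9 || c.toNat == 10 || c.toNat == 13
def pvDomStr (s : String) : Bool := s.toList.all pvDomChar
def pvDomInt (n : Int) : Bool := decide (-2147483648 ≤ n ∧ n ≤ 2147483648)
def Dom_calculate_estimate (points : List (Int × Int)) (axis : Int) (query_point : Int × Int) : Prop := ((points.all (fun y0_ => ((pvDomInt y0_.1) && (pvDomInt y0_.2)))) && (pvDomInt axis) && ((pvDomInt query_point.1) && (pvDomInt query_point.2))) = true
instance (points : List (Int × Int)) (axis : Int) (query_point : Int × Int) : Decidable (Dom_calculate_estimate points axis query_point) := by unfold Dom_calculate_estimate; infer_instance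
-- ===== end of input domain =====

-- B re-decomposes A's iterative binary search into a recursive search step returning the landed state plus a separate edge-handling step (objective: alternative decomposition, same cost).

-- ===== PORT A =====
-- tuple indexing p[axis]; exact for axis ∈ {0, 1, -1, -2} (other axes raise IndexError in Python and are excluded by Pre_)
def pvPairGetA (p : Int × Int) (axis : Int) : Int :=
  if axis = 0 ∨ axis = -2 then p.1 else p.2

-- the while-loop of A, state (low, high); the edge cases after the loop are the else-branch
def pvLoopA (points : List (Int × Int)) (axis : Int) (query_point : Int × Int)
    (low high : Int) : Int × Int :=
  if _h : low ≤ high then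
    let mid := PySem.Int.floordiv (low + high) 2
    if pvPairGetA (PySem.List.pyGetD points mid (0, 0)) axis = pvPairGetA query_point axis then
      (mid, mid)
    else if pvPairGetA (PySem.List.pyGetD points mid (0, 0)) axis < pvPairGetA query_point axis then
      pvLoopA points axis query_point (mid + 1) high
    else
      pvLoopA points axis query_point low (mid - 1)
  else
    if high < 0 then (low, low + 1)
    else if low ≥ (points.length : Int) then (high - 1, high)
    else if |pvPairGetA (PySem.List.pyGetD points low (0, 0)) axis - pvPairGetA query_point axis| <
            |pvPairGetA (PySem.List.pyGetD points high (0, 0)) axis - pvPairGetA query_point axis| then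
      (low, low + 1)
    else (high - 1, high)
termination_by (high + 1 - low).toNat
decreasing_by
  · have := PySem.Int.floordiv_two_mid_bounds _h
    omega
  · have := PySem.Int.floordiv_two_mid_bounds _h
    omega

def calculate_estimate (points : List (Int × Int)) (axis : Int) (query_point : Int × Int) : Int × Int :=
  pvLoopA points axis query_point 0 ((points.length : Int) - 1)

-- ===== PORT B =====  (B indexes tuples the same way; the helper pvPairGetA is shared)
-- B's recursive search: returns (exact-match index or none, final low, final high)
def pvSearchB (points : List (Int × Int)) (axis : Int) (query_point : Int × Int)
    (low high : Int) : Option Int × Int × Int :=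
  if _h : low > high then (none, low, high)
  else
    if pvPairGetA (PySem.List.pyGetD points (PySem.Int.floordiv (low + high) 2) (0, 0)) axis = pvPairGetA query_point axis then
      (some (PySem.Int.floordiv (low + high) 2), low, high)
    else if pvPairGetA (PySem.List.pyGetD points (PySem.Int.floordiv (low + high) 2) (0, 0)) axis < pvPairGetA query_point axis then
      pvSearchB points axis query_point (PySem.Int.floordiv (low + high) 2 + 1) high
    else
      pvSearchB points axis query_point low (PySem.Int.floordiv (low + high) 2 - 1)
termination_by (high + 1 - low).toNat
decreasing_by
  · have := PySem.Int.floordiv_two_mid_bounds (by omega : low ≤ high)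
    omega
  · have := PySem.Int.floordiv_two_mid_bounds (by omega : low ≤ high)
    omega

-- B's separate edge-handling step
def pvFinishB (points : List (Int × Int)) (axis : Int) (query_point : Int × Int)
    (r : Option Int × Int × Int) : Int × Int :=
  match r with
  | (some m, _, _) => (m, m)
  | (none, low, high) =>
    if high < 0 then (low, low + 1)
    else if low ≥ (points.length : Int) then (high - 1, high)
    else if |pvPairGetA (PySem.List.pyGetD points low (0, 0)) axis - pvPairGetA query_point axis| <
            |pvPairGetA (PySem.List.pyGetD points high (0, 0)) axis - pvPairGetA query_point axis| then
      (low, low + 1)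
    else (high - 1, high)

def calculate_estimate_alt (points : List (Int × Int)) (axis : Int) (query_point : Int × Int) : Int × Int :=
  pvFinishB points axis query_point
    (pvSearchB points axis query_point 0 ((points.length : Int) - 1))

-- ===== PRECONDITION & SPEC =====
-- Pre_ excludes nonempty points with axis outside {0, 1, -1, -2}: there Python A raises IndexError on points[mid][axis] (with empty points the loop body and the indexing branches are never reached, so any axis is fine).
def Pre_calculate_estimate (points : List (Int × Int)) (axis : Int) (query_point : Int × Int) : Prop :=
  points = [] ∨ axis = 0 ∨ axis = 1 ∨ axis = -1 ∨ axis = -2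
instance (points : List (Int × Int)) (axis : Int) (query_point : Int × Int) : Decidable (Pre_calculate_estimate points axis query_point) := by unfold Pre_calculate_estimate; infer_instance

def pvWitness_calculate_estimate : (List (Int × Int)) × Int × (Int × Int) := ([(1, 2), (3, 4), (5, 6)], 0, (4, 0))

def Spec_calculate_estimate (points : List (Int × Int)) (axis : Int) (query_point : Int × Int) (out : Int × Int) : Prop := out = calculate_estimate_alt points axis query_point
instance (points : List (Int × Int)) (axis : Int) (query_point : Int × Int) (out : Int × Int) : Decidable (Spec_calculate_estimate points axis query_point out) := by unfold Spec_calculate_estimate; infer_instance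

-- ===== CLAIM (what is proved, stated in full; the proofs are below) =====
def Claim_equal_calculate_estimate : Prop := ∀ (points : List (Int × Int)) (axis : Int) (query_point : Int × Int), Dom_calculate_estimate points axis query_point → Pre_calculate_estimate points axis query_point → Spec_calculate_estimate points axis query_point (calculate_estimate points axis query_point)

-- ===== LEMMAS AND PROOFS =====
theorem pvLoopA_eq_searchB (points : List (Int × Int)) (axis : Int) (query_point : Int × Int)
    (low high : Int) :
    pvLoopA points axis query_point low high =
      pvFinishB points axis query_point (pvSearchB points axis query_point low high) := by
  fun_induction pvLoopA points axis query_point low high with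
  | case1 low high h mid h1 =>
    rw [pvSearchB, dif_neg (show ¬ low > high by omega)]
    rw [if_pos (show pvPairGetA (PySem.List.pyGetD points (PySem.Int.floordiv (low + high) 2) (0,0)) axis = pvPairGetA query_point axis from h1)]
    rfl
  | case2 low high h mid h1 h2 ih =>
    rw [pvSearchB, dif_neg (show ¬ low > high by omega)]
    rw [if_neg (show ¬ pvPairGetA (PySem.List.pyGetD points (PySem.Int.floordiv (low + high) 2) (0,0)) axis = pvPairGetA query_point axis from h1)]
    rw [if_pos (show pvPairGetA (PySem.List.pyGetD points (PySem.Int.floordiv (low + high) 2) (0,0)) axis < pvPairGetA query_point axis from h2)]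
    exact ih
  | case3 low high h mid h1 h2 ih =>
    rw [pvSearchB, dif_neg (show ¬ low > high by omega)]
    rw [if_neg (show ¬ pvPairGetA (PySem.List.pyGetD points (PySem.Int.floordiv (low + high) 2) (0,0)) axis = pvPairGetA query_point axis from h1)]
    rw [if_neg (show ¬ pvPairGetA (PySem.List.pyGetD points (PySem.Int.floordiv (low + high) 2) (0,0)) axis < pvPairGetA query_point axis from h2)]
    exact ih
  | case4 low high h h1 =>
    rw [pvSearchB, dif_pos (show low > high by omega)]
    simp [pvFinishB, h1]
  | case5 low high h h1 h2 =>
    rw [pvSearchB, dif_pos (show low > high by omega)]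
    simp [pvFinishB, h1, h2]
  | case6 low high h h1 h2 h3 =>
    rw [pvSearchB, dif_pos (show low > high by omega)]
    simp only [pvFinishB]
    rw [if_neg h1, if_neg (show ¬ (points.length : Int) ≤ low from h2)]
    rw [if_pos (show |pvPairGetA (PySem.List.pyGetD points low (0,0)) axis - pvPairGetA query_point axis| < |pvPairGetA (PySem.List.pyGetD points high (0,0)) axis - pvPairGetA query_point axis| from h3)]
  | case7 low high h h1 h2 h3 =>
    rw [pvSearchB, dif_pos (show low > high by omega)]
    simp only [pvFinishB]
    rw [if_neg h1, if_neg (show ¬ (points.length : Int) ≤ low from h2)]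
    rw [if_neg (show ¬ |pvPairGetA (PySem.List.pyGetD points low (0,0)) axis - pvPairGetA query_point axis| < |pvPairGetA (PySem.List.pyGetD points high (0,0)) axis - pvPairGetA query_point axis| from h3)]

-- ===== VERDICT (by name: the statement is the Claim_ definition above) =====
theorem calculate_estimate_spec : Claim_equal_calculate_estimate := by
  intro points axis query_point _ _
  unfold Spec_calculate_estimate calculate_estimate calculate_estimate_alt
  exact pvLoopA_eq_searchB points axis query_point 0 ((points.length : Int) - 1)
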